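-- pv_equiv track=rewrite | github.com/chasep255/VQWave | scripts/generate_audio.py | code_to_ascii
-- ===== SOURCE A (Python) =====
-- _BASE64_CHARS = "ABCDEFGHIJKLMNOPQRSTUVWXYZabcdefghijklmnopqrstuvwxyz0123456789+/"
--
-- def code_to_ascii(code: int) -> str:
--     """
--     Render an integer code as a compact ASCII string.
--
--     Uses base64 chars so it stays readable in terminals (unlike random Unicode).
--     - For code < 4096: 2 chars
--     - Otherwise: variable-length base64 (no padding)
--     """
--     if code < 0:
--         return "??"
--     if code < 4096:
--         return _BASE64_CHARS[(code >> 6) & 63] + _BASE64_CHARS[code & 63]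
--     out = []
--     x = code
--     while x > 0:
--         out.append(_BASE64_CHARS[x & 63])
--         x >>= 6
--     return "".join(reversed(out))
-- ===== SOURCE B (Python) =====
-- _BASE64_CHARS = "ABCDEFGHIJKLMNOPQRSTUVWXYZabcdefghijklmnopqrstuvwxyz0123456789+/"
--
-- def code_to_ascii(code: int) -> str:
--     if code < 0:
--         return "??"
--     digits = max(2, (code.bit_length() + 5) // 6)
--     return "".join(_BASE64_CHARS[(code >> (6 * i)) & 63] for i in range(digits - 1, -1, -1))
-- ===== Notes on version B (the rewrite author's own statement) =====
-- stated objective: simpler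
-- what changed: B replaces A's two branches (hard-coded 2-char arithmetic plus an LSB-first append-and-reverse loop) with a single pass: it computes the output length up front as max(2, ceil(bit_length/6)) and emits the 6-bit slices most-significant-first by positional shifting.
import Mathlib
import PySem

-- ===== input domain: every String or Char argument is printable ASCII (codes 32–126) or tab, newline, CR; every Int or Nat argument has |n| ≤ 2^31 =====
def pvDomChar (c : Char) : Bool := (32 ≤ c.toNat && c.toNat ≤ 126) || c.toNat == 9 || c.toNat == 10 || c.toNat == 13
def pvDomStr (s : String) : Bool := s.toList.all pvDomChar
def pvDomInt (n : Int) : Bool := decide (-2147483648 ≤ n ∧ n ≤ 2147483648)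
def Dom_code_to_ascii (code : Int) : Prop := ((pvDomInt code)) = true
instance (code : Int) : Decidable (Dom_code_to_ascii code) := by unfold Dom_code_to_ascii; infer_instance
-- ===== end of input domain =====

-- B unifies A's two branches: it computes the digit count first (max 2, ⌈bit_length/6⌉) and
-- emits the 6-bit slices most-significant-first by positional indexing, instead of A's
-- LSB-first append loop plus reversal; objective: simpler (no speed claim).

-- ===== PORT A =====
-- the module constant _BASE64_CHARS (1-char Python strings are ported as Char)
def pvB64 : List Char := "ABCDEFGHIJKLMNOPQRSTUVWXYZabcdefghijklmnopqrstuvwxyz0123456789+/".toList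

-- _BASE64_CHARS[i]; every index either port produces is in [0, 64), so the default is never used
def pvB64c (i : Int) : Char := (PySem.List.pyGet? pvB64 i).getD ' '

-- A's 'while x > 0' loop; x stays nonnegative (entered with x = code ≥ 4096), so it is run on Nat
-- (x & 63 is &&& 63, x >>= 6 is >>> 6 — exact for nonnegative x); the list is LSB-first like A's 'out'
def pvLoopA (x : Nat) : List Char :=
  if _h : x = 0 then [] else pvB64c ((x &&& 63 : Nat) : Int) :: pvLoopA (x >>> 6)
decreasing_by
  simp only [Nat.shiftRight_eq_div_pow]
  exact Nat.div_lt_self (by omega) (by norm_num)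

def code_to_ascii (code : Int) : String :=
  if code < 0 then "??"
  else if code < 4096 then
    String.mk [pvB64c (PySem.Int.band (code >>> (6:Nat)) 63), pvB64c (PySem.Int.band code 63)]
  else
    String.mk (pvLoopA code.toNat).reverse

-- ===== PORT B =====
def code_to_ascii_alt (code : Int) : String :=
  if code < 0 then "??"
  else
    let digits : Nat := max 2 ((PySem.Int.bitLength code + 5) / 6)
    -- range(digits-1, -1, -1) is the reversed range
    String.mk ((List.range digits).reverse.map (fun (i : Nat) => pvB64c (PySem.Int.band (code >>> (6 * i)) 63)))

-- ===== PRECONDITION & SPEC =====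
def Spec_code_to_ascii (code : Int) (out : String) : Prop := out = code_to_ascii_alt code
instance (code : Int) (out : String) : Decidable (Spec_code_to_ascii code out) := by unfold Spec_code_to_ascii; infer_instance

-- ===== CLAIM (what is proved, stated in full; the proofs are below) =====
def Claim_equal_code_to_ascii : Prop := ∀ (code : Int), Dom_code_to_ascii code → Spec_code_to_ascii code (code_to_ascii code)

-- ===== LEMMAS AND PROOFS =====

-- bitLength of a Nat cast, characterised by powers of two (emulates Nat.size_le / Nat.lt_size)
lemma pvBL_le {n k : Nat} (h : n < 2 ^ k) : PySem.Int.bitLength (n : Int) ≤ k := by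
  by_contra hc
  rcases Nat.eq_zero_or_pos n with h0 | h0
  · subst h0; simp [PySem.Int.bitLength_zero] at hc
  · have hne : (n : Int) ≠ 0 := by exact_mod_cast (by omega : n ≠ 0)
    have h1 := PySem.Int.two_pow_bitLength_le (n : Int) hne
    have h2 : k ≤ PySem.Int.bitLength (n : Int) - 1 := by omega
    have := Nat.pow_le_pow_right (by norm_num : 1 ≤ 2) h2
    simp only [Int.natAbs_natCast] at h1
    omega

lemma pvBL_lt {n k : Nat} (h : 2 ^ k ≤ n) : k < PySem.Int.bitLength (n : Int) := by
  have h1 := PySem.Int.lt_two_pow_bitLength (n : Int)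
  simp only [Int.natAbs_natCast] at h1
  by_contra hc
  have : PySem.Int.bitLength (n : Int) ≤ k := by omega
  have := Nat.pow_le_pow_right (by norm_num : 1 ≤ 2) this
  omega

-- the digit count of n / 64 is one less, for n ≥ 64
lemma pvBL_div64 {n : Nat} (h : 64 ≤ n) :
    PySem.Int.bitLength ((n / 64 : Nat) : Int) = PySem.Int.bitLength (n : Int) - 6 := by
  set s := PySem.Int.bitLength (n : Int) with hs
  have hs7 : 7 ≤ s := pvBL_lt (k := 6) (by omega)
  have hlt : n < 2 ^ s := by
    have := PySem.Int.lt_two_pow_bitLength (n : Int); simpa using this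
  have hge : 2 ^ (s - 1) ≤ n := by
    have := PySem.Int.two_pow_bitLength_le (n : Int) (by exact_mod_cast (by omega : n ≠ 0))
    simpa using this
  have hub : n / 64 < 2 ^ (s - 6) := by
    rw [Nat.div_lt_iff_lt_mul (by norm_num)]
    calc n < 2 ^ s := hlt
    _ = 2 ^ (s - 6) * 64 := by
        rw [show (64 : Nat) = 2 ^ 6 from rfl, ← pow_add]; congr 1; omega
  have hlb : 2 ^ (s - 7) ≤ n / 64 := by
    rw [Nat.le_div_iff_mul_le (by norm_num)]
    calc 2 ^ (s - 7) * 64 = 2 ^ (s - 1) := by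
          rw [show (64 : Nat) = 2 ^ 6 from rfl, ← pow_add]; congr 1; omega
    _ ≤ n := hge
  have h1 := pvBL_le hub
  have h2 := pvBL_lt hlb
  omega

-- a shift by zero is the identity (both constructors of Int)
lemma pvShift0 (c : Int) : c >>> (0 : Nat) = c := by cases c <;> rfl

-- the Int-side slice B computes equals the Nat-side slice
lemma pvSlice_cast (n k : Nat) :
    PySem.Int.band ((n : Int) >>> k) 63 = (((n >>> k) &&& 63 : Nat) : Int) := by
  have h1 : ((n : Int) >>> k) = ((n >>> k : Nat) : Int) := rfl
  rw [h1]
  exact_mod_cast PySem.Int.band_natCast (n >>> k) 63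

-- core: A's LSB-first loop lists exactly the (bitLength+5)/6 slices, index 0 first
lemma pvLoopA_eq (n : Nat) (h : 0 < n) :
    pvLoopA n =
      (List.range ((PySem.Int.bitLength (n : Int) + 5) / 6)).map
        (fun i => pvB64c (((n >>> (6 * i)) &&& 63 : Nat) : Int)) := by
  induction n using Nat.strong_induction_on with
  | _ n ih =>
    rw [pvLoopA]
    rw [dif_neg (by omega : ¬ n = 0)]
    have hsh : n >>> 6 = n / 64 := by simp [Nat.shiftRight_eq_div_pow]
    by_cases h64 : n < 64
    · have hd0 : n / 64 = 0 := Nat.div_eq_of_lt h64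
      have hs1 : PySem.Int.bitLength (n : Int) ≤ 6 := pvBL_le (by omega)
      have hs2 : 0 < PySem.Int.bitLength (n : Int) := pvBL_lt (k := 0) (by omega)
      have hd : (PySem.Int.bitLength (n : Int) + 5) / 6 = 1 := by omega
      rw [hd, hsh, hd0, pvLoopA]
      simp
    · have hdp : 0 < n / 64 := Nat.div_pos (by omega) (by norm_num)
      have hlt : n / 64 < n := Nat.div_lt_self h (by norm_num)
      have := ih (n / 64) hlt hdp
      rw [hsh, this, pvBL_div64 (by omega)]
      have hs7 : 7 ≤ PySem.Int.bitLength (n : Int) := pvBL_lt (k := 6) (by omega)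
      set s := PySem.Int.bitLength (n : Int)
      have harith : (s + 5) / 6 = (s - 6 + 5) / 6 + 1 := by omega
      rw [harith, List.range_succ_eq_map]
      simp only [List.map_cons, List.map_map]
      congr 1
      apply List.map_congr_left
      intro i _
      simp only [Function.comp_apply]
      congr 2
      conv_rhs => rw [show 6 * Nat.succ i = 6 + 6 * i by omega, Nat.shiftRight_add, hsh]

-- ===== VERDICT (by name: the statement is the Claim_ definition above) =====
theorem code_to_ascii_spec : Claim_equal_code_to_ascii := by
  intro code _
  unfold Spec_code_to_ascii code_to_ascii code_to_ascii_alt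
  by_cases hneg : code < 0
  · simp [hneg]
  · simp only [hneg, if_false]
    have hcast : code = ((code.toNat : Nat) : Int) := (Int.toNat_of_nonneg (by omega)).symm
    set n := code.toNat with hn
    by_cases hsmall : code < 4096
    · have hd : max 2 ((PySem.Int.bitLength code + 5) / 6) = 2 := by
        have : PySem.Int.bitLength code ≤ 12 := by
          rw [hcast]; exact pvBL_le (by omega)
        omega
      simp only [if_pos hsmall, hd]
      have hr : (List.range 2).reverse = [1, 0] := by decide
      rw [hr]
      simp only [List.map_cons, List.map_nil, Nat.mul_one, Nat.mul_zero, pvShift0]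
    · simp only [if_neg hsmall]
      have hn4096 : 4096 ≤ n := by omega
      have hbl : 13 ≤ PySem.Int.bitLength code := by
        rw [hcast]; exact pvBL_lt (k := 12) (by omega)
      have hd : max 2 ((PySem.Int.bitLength code + 5) / 6) =
          (PySem.Int.bitLength code + 5) / 6 := by omega
      rw [hd]
      have hcore := pvLoopA_eq n (by omega)
      have hbleq : PySem.Int.bitLength ((n : Nat) : Int) = PySem.Int.bitLength code := by
        rw [← hcast]
      rw [hcore, hbleq]
      congr 1
      rw [← List.map_reverse]
      apply List.map_congr_left
      intro i _
      rw [hcast, pvSlice_cast]
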